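-- pv_equiv track=rewrite | github.com/renchaojun/prison | bert/reprs.py | constructor_01
-- ===== SOURCE A (Python) =====
-- def constructor_01(docs: list, words: list):
--     if not isinstance(docs[0], list):
--         # ie query doc
--         return [1 if word in docs else 0 for word in words]
--
--     word_doc_repr = [[0 for _ in range(len(docs))] for _ in range(len(words))]
--     for word_idx, word in enumerate(words):
--         for doc_idx, doc in enumerate(docs):
--             if word in doc:
--                 word_doc_repr[word_idx][doc_idx] = 1
--             else:
--                 word_doc_repr[word_idx][doc_idx] = 0
--     return word_doc_repr
-- ===== SOURCE B (Python) =====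
-- def constructor_01(docs: list, words: list):
--     if not isinstance(docs[0], list):
--         # ie query doc
--         return [1 if word in docs else 0 for word in words]
--
--     # invert once: word -> all row indices at which it occurs in `words`
--     rows = {}
--     for i, w in enumerate(words):
--         rows[w] = rows.get(w, []) + [i]
--     matrix = [[0] * len(docs) for _ in words]
--     for doc_idx, doc in enumerate(docs):
--         for tok in doc:
--             for r in rows.get(tok, []):
--                 matrix[r][doc_idx] = 1
--     return matrix
-- ===== Notes on version B (the rewrite author's own statement) =====
-- stated objective: faster
-- what changed: B replaces A's per-(word,doc) nested membership scanning with an inverted index: a dict mapping each word to all its row indices built once, a zero matrix, and a single populate pass over document contents setting cells to 1.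
import Mathlib
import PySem

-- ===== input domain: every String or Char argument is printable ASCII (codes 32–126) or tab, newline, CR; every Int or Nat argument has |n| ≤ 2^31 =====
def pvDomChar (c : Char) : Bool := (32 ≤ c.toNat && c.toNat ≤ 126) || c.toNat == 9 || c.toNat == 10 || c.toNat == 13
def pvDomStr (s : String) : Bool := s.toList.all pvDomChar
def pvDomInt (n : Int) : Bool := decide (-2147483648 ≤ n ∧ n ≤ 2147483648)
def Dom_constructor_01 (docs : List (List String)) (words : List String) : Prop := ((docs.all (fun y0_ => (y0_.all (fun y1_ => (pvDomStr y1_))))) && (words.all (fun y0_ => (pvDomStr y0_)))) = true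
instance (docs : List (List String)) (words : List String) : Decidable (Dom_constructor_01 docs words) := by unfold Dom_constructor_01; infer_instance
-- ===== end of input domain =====

-- B replaces A's per-cell membership scans by a word→row-indices dictionary built once,
-- then a single populate pass over document contents (objective: alternative data structure).
-- Under the typed domain docs : List (List String) the Python query branch
-- `if not isinstance(docs[0], list)` can only raise (on empty docs) or fall through,
-- so both ports return [] on docs = [] (Python raises IndexError there; excluded by Pre_).

-- ===== PORT A =====
def constructor_01 (docs : List (List String)) (words : List String) : List (List Int) :=
  if docs = [] then []   -- Python: docs[0] raises IndexError; isinstance branch never taken on List (List String)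
  else
    -- word_doc_repr = [[0 for _ in range(len(docs))] for _ in range(len(words))]
    let init : List (List Int) :=
      (List.range words.length).map (fun _ => (List.range docs.length).map (fun _ => (0 : Int)))
    -- for word_idx, word in enumerate(words): for doc_idx, doc in enumerate(docs): set cell
    (words.zipIdx).foldl (fun m p =>
      (docs.zipIdx).foldl (fun m q =>
        m.modify p.2 (fun row => row.set q.2 (if q.1.contains p.1 then 1 else 0))) m) init

-- ===== PORT B =====
def constructor_01_alt (docs : List (List String)) (words : List String) : List (List Int) :=
  if docs = [] then []   -- same query-branch behaviour as A (raises in Python; excluded by Pre_)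
  else
    -- rows[w] = rows.get(w, []) + [i]  for i, w in enumerate(words)
    let rows : PySem.Dict String (List Nat) :=
      (words.zipIdx).foldl (fun d p => d.modify p.1 [] (· ++ [p.2])) PySem.Dict.empty
    -- matrix = [[0] * len(docs) for _ in words]
    let init : List (List Int) := words.map (fun _ => List.replicate docs.length (0 : Int))
    -- for doc_idx, doc in enumerate(docs): for tok in doc: for r in rows.get(tok, []): matrix[r][doc_idx] = 1
    (docs.zipIdx).foldl (fun m q =>
      q.1.foldl (fun m tok =>
        (rows.getD tok []).foldl (fun m r => m.modify r (fun row => row.set q.2 1)) m) m) init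

-- ===== PRECONDITION & SPEC =====
-- Pre_ excludes only docs = [], where the Python A (and B) raises IndexError on docs[0].
def Pre_constructor_01 (docs : List (List String)) (words : List String) : Prop := docs ≠ []
instance (docs : List (List String)) (words : List String) : Decidable (Pre_constructor_01 docs words) := by unfold Pre_constructor_01; infer_instance
def pvWitness_constructor_01 : List (List String) × List String := ([["a", "b"], []], ["b", "a", "b"])
def Spec_constructor_01 (docs : List (List String)) (words : List String) (out : List (List Int)) : Prop := out = constructor_01_alt docs words
instance (docs : List (List String)) (words : List String) (out : List (List Int)) : Decidable (Spec_constructor_01 docs words out) := by unfold Spec_constructor_01; infer_instance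

-- ===== CLAIM (what is proved, stated in full; the proofs are below) =====
def Claim_equal_constructor_01 : Prop := ∀ (docs : List (List String)) (words : List String), Dom_constructor_01 docs words → Pre_constructor_01 docs words → Spec_constructor_01 docs words (constructor_01 docs words)

-- ===== LEMMAS AND PROOFS =====

-- the common value both ports compute: the word-document incidence matrix
def pvM (docs : List (List String)) (words : List String) : List (List Int) :=
  words.map (fun w => docs.map (fun d => if d.contains w then (1 : Int) else 0))

def pvCell (m : List (List Int)) (r c : Nat) : Int := ((m[r]?.getD [])[c]?).getD 0
def pvShape (m : List (List Int)) : List Nat := m.map List.length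

lemma pvCell_eq (m : List (List Int)) (r c : Nat) (hr : r < m.length) (hc : c < (m[r]'hr).length) :
    pvCell m r c = (m[r]'hr)[c]'hc := by
  simp [pvCell, List.getElem?_eq_getElem hr, List.getElem?_eq_getElem hc]

lemma pvShape_modify_set (m : List (List Int)) (i j : Nat) (v : Int) :
    pvShape (m.modify i (fun row => row.set j v)) = pvShape m := by
  apply List.ext_getElem
  · simp [pvShape]
  · intro k h1 h2
    simp only [pvShape, List.getElem_map, List.getElem_modify]
    split <;> simp

lemma pvShape_foldl {α : Type} (step : List (List Int) → α → List (List Int))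
    (h : ∀ m x, pvShape (step m x) = pvShape m) :
    ∀ (l : List α) (m : List (List Int)), pvShape (l.foldl step m) = pvShape m := by
  intro l
  induction l with
  | nil => intro m; rfl
  | cons a l ih => intro m; simp only [List.foldl_cons]; rw [ih, h]

lemma pvLen_of_shape {m m' : List (List Int)} (h : pvShape m' = pvShape m) :
    m'.length = m.length := by
  have := congrArg List.length h; simpa [pvShape] using this

lemma pvRowLen_of_shape {m m' : List (List Int)} (h : pvShape m' = pvShape m) (r : Nat)
    (hr' : r < m'.length) (hr : r < m.length) : (m'[r]'hr').length = (m[r]'hr).length := by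
  have := congrArg (fun l => l[r]?) h
  simp only [pvShape, List.getElem?_map, List.getElem?_eq_getElem hr, List.getElem?_eq_getElem hr'] at this
  simpa using this

lemma pvMatrix_ext {m1 m2 : List (List Int)} (h : pvShape m1 = pvShape m2)
    (hc : ∀ r c (hr : r < m1.length) (hcc : c < (m1[r]'hr).length), pvCell m1 r c = pvCell m2 r c) :
    m1 = m2 := by
  have hl : m1.length = m2.length := pvLen_of_shape h
  apply List.ext_getElem hl
  intro r hr1 hr2
  have hrl : (m1[r]'hr1).length = (m2[r]'hr2).length := pvRowLen_of_shape h r hr1 hr2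
  apply List.ext_getElem hrl
  intro c hc1 hc2
  have := hc r c hr1 hc1
  rwa [pvCell_eq m1 r c hr1 hc1, pvCell_eq m2 r c hr2 hc2] at this

lemma pvCell_modify_set (m : List (List Int)) (i j : Nat) (v : Int) (r c : Nat)
    (hr : r < m.length) (hc : c < (m[r]'hr).length) :
    pvCell (m.modify i (fun row => row.set j v)) r c = if i = r ∧ j = c then v else pvCell m r c := by
  by_cases hir : i = r
  · subst hir
    by_cases hjc : j = c
    · subst hjc
      simp [pvCell, List.getElem?_modify, List.getElem?_eq_getElem hr, List.getElem?_set, hc]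
    · simp [pvCell, List.getElem?_modify, List.getElem?_eq_getElem hr, List.getElem?_set, hjc]
  · simp only [pvCell, List.getElem?_modify]
    rw [if_neg (by intro h; exact hir h.1)]
    cases m[r]? <;> simp [hir]

-- ===== B-side =====

lemma pv_ite_or {A B : Prop} [Decidable A] [Decidable B] {x y : Int} :
    (if A then x else if B then x else y) = if A ∨ B then x else y := by
  by_cases hA : A <;> by_cases hB : B <;> simp [hA, hB]

lemma pvB_markRows (j : Nat) :
    ∀ (L : List Nat) (m : List (List Int)) (r c : Nat)
      (hr : r < m.length) (hc : c < (m[r]'hr).length),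
      pvCell (L.foldl (fun m x => m.modify x (fun row => row.set j 1)) m) r c
        = if r ∈ L ∧ c = j then 1 else pvCell m r c := by
  intro L
  induction L with
  | nil => intro m r c hr hc; simp
  | cons a L ih =>
    intro m r c hr hc
    simp only [List.foldl_cons]
    have hsh : pvShape (m.modify a (fun row => row.set j 1)) = pvShape m := pvShape_modify_set m a j 1
    have hr' : r < (m.modify a (fun row => row.set j 1)).length := by rw [pvLen_of_shape hsh]; exact hr
    have hc' : c < ((m.modify a (fun row => row.set j 1))[r]'hr').length := by
      rw [pvRowLen_of_shape hsh r hr' hr]; exact hc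
    rw [ih _ r c hr' hc', pvCell_modify_set m a j 1 r c hr hc]
    by_cases h1 : r ∈ L <;> by_cases h2 : c = j <;> by_cases h3 : r = a <;>
      simp_all [List.mem_cons, eq_comm]

lemma pvB_shape_markRows (j : Nat) (L : List Nat) (m : List (List Int)) :
    pvShape (L.foldl (fun m x => m.modify x (fun row => row.set j 1)) m) = pvShape m :=
  pvShape_foldl _ (fun m x => pvShape_modify_set m x j 1) L m

lemma pvB_shape_markDoc (rows : PySem.Dict String (List Nat)) (j : Nat) (doc : List String)
    (m : List (List Int)) :
    pvShape (doc.foldl (fun m tok => (rows.getD tok []).foldl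
      (fun m x => m.modify x (fun row => row.set j 1)) m) m) = pvShape m :=
  pvShape_foldl _ (fun m tok => pvB_shape_markRows j (rows.getD tok []) m) doc m

lemma pvB_markDoc (rows : PySem.Dict String (List Nat)) (j : Nat) :
    ∀ (doc : List String) (m : List (List Int)) (r c : Nat)
      (hr : r < m.length) (hc : c < (m[r]'hr).length),
      pvCell (doc.foldl (fun m tok => (rows.getD tok []).foldl
          (fun m x => m.modify x (fun row => row.set j 1)) m) m) r c
        = if (∃ tok ∈ doc, r ∈ rows.getD tok []) ∧ c = j then 1 else pvCell m r c := by
  intro doc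
  induction doc with
  | nil => intro m r c hr hc; simp
  | cons t doc ih =>
    intro m r c hr hc
    simp only [List.foldl_cons]
    have hsh := pvB_shape_markRows j (rows.getD t []) m
    have hr' : r < ((rows.getD t []).foldl (fun m x => m.modify x (fun row => row.set j 1)) m).length := by
      rw [pvLen_of_shape hsh]; exact hr
    have hc' : c < (((rows.getD t []).foldl (fun m x => m.modify x (fun row => row.set j 1)) m)[r]'hr').length := by
      rw [pvRowLen_of_shape hsh r hr' hr]; exact hc
    rw [ih _ r c hr' hc', pvB_markRows j (rows.getD t []) m r c hr hc, pv_ite_or]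
    simp only [List.exists_mem_cons_iff]
    exact if_congr (or_comm.trans or_and_right.symm) rfl rfl

lemma pvB_cols (rows : PySem.Dict String (List Nat)) :
    ∀ (ds : List (List String)) (k : Nat) (m : List (List Int)) (r c : Nat)
      (hr : r < m.length) (hc : c < (m[r]'hr).length),
      pvCell ((ds.zipIdx k).foldl (fun m q =>
          q.1.foldl (fun m tok => (rows.getD tok []).foldl
            (fun m x => m.modify x (fun row => row.set q.2 1)) m) m) m) r c
        = if k ≤ c ∧ ∃ tok ∈ (ds[c - k]?.getD []), r ∈ rows.getD tok [] then 1
          else pvCell m r c := by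
  intro ds
  induction ds with
  | nil => intro k m r c hr hc; simp
  | cons d ds ih =>
    intro k m r c hr hc
    simp only [List.zipIdx_cons, List.foldl_cons]
    have hsh := pvB_shape_markDoc rows k d m
    set m' := d.foldl (fun m tok => (rows.getD tok []).foldl
      (fun m x => m.modify x (fun row => row.set k 1)) m) m with hm'
    have hr' : r < m'.length := by rw [pvLen_of_shape hsh]; exact hr
    have hc' : c < (m'[r]'hr').length := by rw [pvRowLen_of_shape hsh r hr' hr]; exact hc
    rw [ih (k + 1) m' r c hr' hc', hm', pvB_markDoc rows k d m r c hr hc]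
    rcases Nat.lt_trichotomy c k with hck | hck | hck
    · rw [if_neg (by rintro ⟨h, -⟩; omega), if_neg (by rintro ⟨-, h⟩; omega),
        if_neg (by rintro ⟨h, -⟩; omega)]
    · subst hck
      rw [if_neg (by rintro ⟨h, -⟩; omega)]
      simp only [Nat.sub_self, List.getElem?_cons_zero, Option.getD_some, le_refl, true_and,
        and_true]
    · have hidx : (d :: ds)[c - k]? = ds[c - (k + 1)]? := by
        have : c - k = (c - (k + 1)) + 1 := by omega
        rw [this, List.getElem?_cons_succ]
      rw [hidx]
      have hdead : (if (∃ tok ∈ d, r ∈ rows.getD tok []) ∧ c = k then (1 : Int)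
          else pvCell m r c) = pvCell m r c :=
        if_neg (fun h => absurd h.2 (by omega))
      rw [hdead]
      exact if_congr ⟨fun h => ⟨by omega, h.2⟩, fun h => ⟨by omega, h.2⟩⟩ rfl rfl

lemma pvB_rows_mem (words : List String) (tok : String) (r : Nat) :
    r ∈ ((words.zipIdx).foldl (fun d p => d.modify p.1 [] (· ++ [p.2])) PySem.Dict.empty).getD tok []
      ↔ ∃ hr : r < words.length, words[r] = tok := by
  rw [PySem.Dict.getD_foldl_modify_append]
  simp only [PySem.Dict.getD_empty, List.nil_append, List.mem_map, List.mem_filter]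
  constructor
  · rintro ⟨⟨w, i⟩, ⟨hmem, hbeq⟩, hi⟩
    simp only at hi
    subst hi
    rw [List.mem_zipIdx_iff_getElem?] at hmem
    have hlt : i < words.length := by
      by_contra h
      rw [List.getElem?_eq_none (by omega)] at hmem
      cases hmem
    refine ⟨hlt, ?_⟩
    rw [List.getElem?_eq_getElem hlt] at hmem
    have : words[i] = w := Option.some.inj hmem
    rw [this]; exact eq_of_beq hbeq
  · rintro ⟨hr, heq⟩
    refine ⟨(words[r], r), ⟨?_, ?_⟩, rfl⟩
    · rw [List.mem_zipIdx_iff_getElem?, List.getElem?_eq_getElem hr]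
    · simp [heq]

lemma pvB_eq (docs : List (List String)) (words : List String) (hne : docs ≠ []) :
    constructor_01_alt docs words = pvM docs words := by
  unfold constructor_01_alt
  rw [if_neg hne]
  set rows := (words.zipIdx).foldl (fun d p => d.modify p.1 [] (· ++ [p.2])) PySem.Dict.empty with hrows
  set init : List (List Int) := words.map (fun _ => List.replicate docs.length (0 : Int)) with hinit
  have hshi : pvShape init = List.replicate words.length docs.length := by
    simp [pvShape, hinit]
  have hshf : pvShape ((docs.zipIdx).foldl (fun m q =>
      q.1.foldl (fun m tok => (rows.getD tok []).foldl
        (fun m x => m.modify x (fun row => row.set q.2 1)) m) m) init) = pvShape init :=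
    pvShape_foldl _ (fun (m : List (List Int)) (q : List String × Nat) => pvB_shape_markDoc rows q.2 q.1 m) _ init
  have hshM : pvShape (pvM docs words) = List.replicate words.length docs.length := by
    apply List.ext_getElem <;> simp [pvShape, pvM]
  refine pvMatrix_ext ?_ ?_
  · rw [hshf, hshi, hshM]
  intro r c hr hcc
  have hrF : r < init.length := by rw [← pvLen_of_shape hshf]; exact hr
  have hrw : r < words.length := by simpa [hinit] using hrF
  have hcF : c < (init[r]'hrF).length := by rw [← pvRowLen_of_shape hshf r hr hrF]; exact hcc
  have hcd : c < docs.length := by simpa [hinit] using hcF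
  rw [pvB_cols rows docs 0 init r c hrF hcF]
  have hidx : docs[c - 0]? = some (docs[c]'hcd) := by
    simpa using List.getElem?_eq_getElem hcd
  rw [hidx]
  simp only [Option.getD_some, Nat.zero_le, true_and]
  have hcond : (∃ tok ∈ docs[c]'hcd, r ∈ rows.getD tok [])
      ↔ (docs[c]'hcd).contains (words[r]'hrw) := by
    rw [hrows]
    constructor
    · rintro ⟨tok, htok, hmem⟩
      rw [pvB_rows_mem] at hmem
      obtain ⟨h1, h2⟩ := hmem
      rw [List.contains_iff_mem, h2]; exact htok
    · intro hct
      rw [List.contains_iff_mem] at hct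
      exact ⟨words[r]'hrw, hct, (pvB_rows_mem words _ r).mpr ⟨hrw, rfl⟩⟩
  have hM0 : pvCell (pvM docs words) r c = if (docs[c]'hcd).contains (words[r]'hrw) then 1 else 0 := by
    have hrM : r < (pvM docs words).length := by simp [pvM, hrw]
    have hcM : c < ((pvM docs words)[r]'hrM).length := by simp [pvM, hcd]
    rw [pvCell_eq _ r c hrM hcM]
    simp [pvM]
  have hinit0 : pvCell init r c = 0 := by
    rw [pvCell_eq init r c hrF hcF]
    simp [hinit]
  rw [hM0, hinit0]
  by_cases hb : (docs[c]'hcd).contains (words[r]'hrw)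
  · rw [if_pos (hcond.mpr hb), if_pos hb]
  · rw [if_neg (fun h => hb (hcond.mp h)), if_neg hb]

-- ===== A-side =====

lemma pvA_inner (w : String) (wi : Nat) :
    ∀ (ds : List (List String)) (k : Nat) (m : List (List Int)) (r c : Nat)
      (hr : r < m.length) (hc : c < (m[r]'hr).length),
      pvCell ((ds.zipIdx k).foldl (fun m q =>
          m.modify wi (fun row => row.set q.2 (if q.1.contains w then 1 else 0))) m) r c
        = if r = wi ∧ k ≤ c ∧ c - k < ds.length
          then (if (ds[c - k]?.getD []).contains w then 1 else 0)
          else pvCell m r c := by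
  intro ds
  induction ds with
  | nil => intro k m r c hr hc; simp
  | cons d ds ih =>
    intro k m r c hr hc
    simp only [List.zipIdx_cons, List.foldl_cons]
    have hsh := pvShape_modify_set m wi k (if d.contains w then 1 else 0)
    set m' := m.modify wi (fun row => row.set k (if d.contains w then 1 else 0)) with hm'
    have hr' : r < m'.length := by rw [pvLen_of_shape hsh]; exact hr
    have hc' : c < (m'[r]'hr').length := by rw [pvRowLen_of_shape hsh r hr' hr]; exact hc
    rw [ih (k + 1) m' r c hr' hc', hm',
      pvCell_modify_set m wi k (if d.contains w then 1 else 0) r c hr hc]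
    rcases Nat.lt_trichotomy c k with hck | hck | hck
    · simp only [List.length_cons]
      split_ifs <;> first | rfl | (exfalso; simp only [and_true, true_and] at *; omega)
    · subst hck
      simp only [Nat.sub_self, List.getElem?_cons_zero, Option.getD_some, List.length_cons]
      split_ifs <;> first | rfl | (exfalso; simp only [and_true, true_and] at *; omega)
    · have hidx : (d :: ds)[c - k]? = ds[c - (k + 1)]? := by
        have : c - k = (c - (k + 1)) + 1 := by omega
        rw [this, List.getElem?_cons_succ]
      rw [hidx]
      simp only [List.length_cons]
      split_ifs <;> first | rfl | (exfalso; simp only [and_true, true_and] at *; omega)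

lemma pvA_shape_inner (w : String) (wi : Nat) (ds : List (List String)) (k : Nat)
    (m : List (List Int)) :
    pvShape ((ds.zipIdx k).foldl (fun m q =>
      m.modify wi (fun row => row.set q.2 (if q.1.contains w then 1 else 0))) m) = pvShape m :=
  pvShape_foldl _ (fun (m : List (List Int)) (q : List String × Nat) => pvShape_modify_set m wi q.2 _) _ m

lemma pvA_outer (docs : List (List String)) :
    ∀ (ws : List String) (k : Nat) (m : List (List Int)) (r c : Nat)
      (hr : r < m.length) (hc : c < (m[r]'hr).length),
      pvCell ((ws.zipIdx k).foldl (fun m p =>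
          (docs.zipIdx).foldl (fun m q =>
            m.modify p.2 (fun row => row.set q.2 (if q.1.contains p.1 then 1 else 0))) m) m) r c
        = if k ≤ r ∧ r - k < ws.length ∧ c < docs.length
          then (if (docs[c]?.getD []).contains (ws[r - k]?.getD "") then 1 else 0)
          else pvCell m r c := by
  intro ws
  induction ws with
  | nil => intro k m r c hr hc; simp
  | cons w ws ih =>
    intro k m r c hr hc
    simp only [List.zipIdx_cons, List.foldl_cons]
    have hsh := pvA_shape_inner w k docs 0 m
    set m' := (docs.zipIdx).foldl (fun m q =>
      m.modify k (fun row => row.set q.2 (if q.1.contains w then 1 else 0))) m with hm'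
    have hr' : r < m'.length := by rw [pvLen_of_shape hsh]; exact hr
    have hc' : c < (m'[r]'hr').length := by rw [pvRowLen_of_shape hsh r hr' hr]; exact hc
    rw [ih (k + 1) m' r c hr' hc', hm', pvA_inner w k docs 0 m r c hr hc]
    rcases Nat.lt_trichotomy r k with hrk | hrk | hrk
    · simp only [List.length_cons, Nat.sub_zero]
      split_ifs <;> first | rfl | (exfalso; simp only [and_true, true_and] at *; omega)
    · subst hrk
      simp only [Nat.sub_self, List.getElem?_cons_zero, Option.getD_some, List.length_cons,
        Nat.sub_zero]
      split_ifs <;> first | rfl | (exfalso; simp only [and_true, true_and] at *; omega)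
    · have hidx : (w :: ws)[r - k]? = ws[r - (k + 1)]? := by
        have : r - k = (r - (k + 1)) + 1 := by omega
        rw [this, List.getElem?_cons_succ]
      rw [hidx]
      simp only [List.length_cons, Nat.sub_zero]
      split_ifs <;> first | rfl | (exfalso; simp only [and_true, true_and] at *; omega)

lemma pvA_eq (docs : List (List String)) (words : List String) (hne : docs ≠ []) :
    constructor_01 docs words = pvM docs words := by
  unfold constructor_01
  rw [if_neg hne]
  set init : List (List Int) :=
    (List.range words.length).map (fun _ => (List.range docs.length).map (fun _ => (0 : Int))) with hinit
  have hshi : pvShape init = List.replicate words.length docs.length := by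
    simp [pvShape, hinit]
  have hshf : pvShape ((words.zipIdx).foldl (fun m p =>
      (docs.zipIdx).foldl (fun m q =>
        m.modify p.2 (fun row => row.set q.2 (if q.1.contains p.1 then 1 else 0))) m) init)
      = pvShape init :=
    pvShape_foldl _ (fun (m : List (List Int)) (p : String × Nat) => pvA_shape_inner p.1 p.2 docs 0 m) _ init
  have hshM : pvShape (pvM docs words) = List.replicate words.length docs.length := by
    apply List.ext_getElem <;> simp [pvShape, pvM]
  refine pvMatrix_ext ?_ ?_
  · rw [hshf, hshi, hshM]
  intro r c hr hcc
  have hrF : r < init.length := by rw [← pvLen_of_shape hshf]; exact hr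
  have hrw : r < words.length := by simpa [hinit] using hrF
  have hcF : c < (init[r]'hrF).length := by rw [← pvRowLen_of_shape hshf r hr hrF]; exact hcc
  have hcd : c < docs.length := by simpa [hinit] using hcF
  rw [pvA_outer docs words 0 init r c hrF hcF]
  rw [if_pos ⟨Nat.zero_le r, by simpa using hrw, hcd⟩]
  have hrM : r < (pvM docs words).length := by simp [pvM, hrw]
  have hcM : c < ((pvM docs words)[r]'hrM).length := by simp [pvM, hcd]
  rw [pvCell_eq _ r c hrM hcM]
  simp [pvM, List.getElem?_eq_getElem hcd, List.getElem?_eq_getElem hrw]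

-- ===== VERDICT (by name: the statement is the Claim_ definition above) =====
theorem constructor_01_spec : Claim_equal_constructor_01 := by
  intro docs words _ hpre
  unfold Spec_constructor_01
  rw [pvA_eq docs words hpre, pvB_eq docs words hpre]
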